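-- pv_equiv track=rewrite | github.com/Ragavi203/DASH-AI | backend/app/services/anomalies.py | _pick_best_datetime
-- ===== SOURCE A (Python) =====
-- from typing import Any
--
-- def _pick_best_datetime(dt_cols: list[str], col_profile: dict[str, Any]) -> str | None:
--     if not dt_cols:
--         return None
--     ranked = []
--     for c in dt_cols:
--         info = col_profile.get(c, {}) or {}
--         ranked.append((int(info.get("count") or 0), c))
--     ranked.sort(reverse=True)
--     return ranked[0][1] if ranked else None
-- ===== SOURCE B (Python) =====
-- def _count(col_profile, c):
--     return int((col_profile.get(c) or {}).get("count") or 0)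
--
--
-- def _pick_best_datetime(dt_cols, col_profile):
--     if not dt_cols:
--         return None
--     best = (_count(col_profile, dt_cols[0]), dt_cols[0])
--     for c in dt_cols[1:]:
--         cnt = _count(col_profile, c)
--         if (cnt, c) > best:
--             best = (cnt, c)
--     return best[1]
-- ===== Notes on version B (the rewrite author's own statement) =====
-- stated objective: faster
-- what changed: Replaces build-list + reverse sort + take-first with a single running-max pass over dt_cols using full (count, column) tuple comparison, preserving the exact tie-break.
import Mathlib
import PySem

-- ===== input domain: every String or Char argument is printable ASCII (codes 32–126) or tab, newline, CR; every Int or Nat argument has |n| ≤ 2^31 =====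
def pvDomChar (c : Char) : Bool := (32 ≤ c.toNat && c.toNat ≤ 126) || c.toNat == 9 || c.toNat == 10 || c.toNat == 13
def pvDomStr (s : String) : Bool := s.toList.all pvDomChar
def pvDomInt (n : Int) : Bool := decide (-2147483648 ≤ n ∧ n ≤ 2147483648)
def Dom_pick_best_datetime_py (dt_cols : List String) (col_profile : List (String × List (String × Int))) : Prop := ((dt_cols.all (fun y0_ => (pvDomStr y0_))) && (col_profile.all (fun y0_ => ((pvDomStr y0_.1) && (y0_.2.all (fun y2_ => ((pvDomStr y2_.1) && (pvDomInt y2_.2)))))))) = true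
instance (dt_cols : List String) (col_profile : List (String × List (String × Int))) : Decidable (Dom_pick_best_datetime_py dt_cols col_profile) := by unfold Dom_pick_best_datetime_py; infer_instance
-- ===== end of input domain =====

-- B replaces A's build-list + reverse-sort + take-first with a single running-max pass
-- (same (count, column) tuple tie-break); objective: faster (one pass, no sort).


-- ===== PORT A =====
-- 'col_profile.get(c, {}) or {}' = getD with default [] (an empty stored dict is replaced by {} = the same []);
-- 'int(info.get("count") or 0)' = getD with default 0 (a stored 0 is replaced by 0; int() of an int is itself).
def pick_best_datetime_py (dt_cols : List String) (col_profile : List (String × List (String × Int))) : Option String :=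
  if dt_cols = [] then none
  else
    let ranked : List (Int × String) := dt_cols.foldl (fun acc c =>
      let info : List (String × Int) := PySem.Dict.getD (PySem.Dict.mk col_profile) c []
      acc ++ [(PySem.Dict.getD (PySem.Dict.mk info) "count" 0, c)]) []
    let rankedSorted := PySem.List.sorted2 ranked (fun p => p.1) (fun p => p.2) true
    match rankedSorted with
    | [] => none
    | p :: _ => some p.2

-- ===== PORT B =====
def pvCount (col_profile : List (String × List (String × Int))) (c : String) : Int :=
  PySem.Dict.getD (PySem.Dict.mk (PySem.Dict.getD (PySem.Dict.mk col_profile) c [])) "count" 0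

def pick_best_datetime_py_alt (dt_cols : List String) (col_profile : List (String × List (String × Int))) : Option String :=
  match dt_cols with
  | [] => none
  | c0 :: rest =>
    let best := rest.foldl (fun best c =>
      let cnt := pvCount col_profile c
      -- Python tuple '>' on (int, str): (cnt, c) > best
      if best.1 < cnt ∨ (best.1 = cnt ∧ best.2 < c) then (cnt, c) else best)
      (pvCount col_profile c0, c0)
    some best.2

-- ===== PRECONDITION & SPEC =====
def Spec_pick_best_datetime_py (dt_cols : List String) (col_profile : List (String × List (String × Int))) (out : Option String) : Prop := out = pick_best_datetime_py_alt dt_cols col_profile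
instance (dt_cols : List String) (col_profile : List (String × List (String × Int))) (out : Option String) : Decidable (Spec_pick_best_datetime_py dt_cols col_profile out) := by unfold Spec_pick_best_datetime_py; infer_instance

-- ===== CLAIM (what is proved, stated in full; the proofs are below) =====
def Claim_equal_pick_best_datetime_py : Prop := ∀ (dt_cols : List String) (col_profile : List (String × List (String × Int))), Dom_pick_best_datetime_py dt_cols col_profile → Spec_pick_best_datetime_py dt_cols col_profile (pick_best_datetime_py dt_cols col_profile)

-- ===== LEMMAS AND PROOFS =====

-- head of insertBy: the new element wins iff it goes before the old head
theorem head?_insertBy {α : Type} (before : α → α → Bool) (x : α) (acc : List α) :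
    (PySem.List.insertBy before x acc).head? =
      some (match acc.head? with
            | none => x
            | some y => if before x y then x else y) := by
  cases acc with
  | nil => simp [PySem.List.insertBy]
  | cons y ys =>
      by_cases h : before x y <;> simp [PySem.List.insertBy, h]

-- running head of the insertion-sort fold, as a fold over Option
theorem head?_foldl_insertBy {α : Type} (before : α → α → Bool) (xs : List α) (acc : List α) :
    ((xs.foldl (fun a x => PySem.List.insertBy before x a) acc).head?) =
      xs.foldl (fun ob x =>
        some (match ob with
              | none => x
              | some y => if before x y then x else y)) acc.head? := by
  induction xs generalizing acc with
  | nil => rfl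
  | cons x xs ih =>
      simp only [List.foldl_cons]
      rw [ih, head?_insertBy]

-- the Option fold with a some start is the plain running max
theorem foldl_step_some {α : Type} (before : α → α → Bool) (xs : List α) (b : α) :
    xs.foldl (fun ob x =>
        some (match ob with
              | none => x
              | some y => if before x y then x else y)) (some b) =
      some (xs.foldl (fun y x => if before x y then x else y) b) := by
  induction xs generalizing b with
  | nil => rfl
  | cons x xs ih => simp only [List.foldl_cons]; rw [ih]

theorem match_snd (l : List (Int × String)) :
    (match l with | [] => (none : Option String) | p :: _ => some p.2) = l.head?.map (·.2) := by
  cases l <;> rfl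

-- ===== VERDICT (by name: the statement is the Claim_ definition above) =====
theorem pick_best_datetime_py_spec : Claim_equal_pick_best_datetime_py := by
  intro dt_cols col_profile _dom
  unfold Spec_pick_best_datetime_py
  cases dt_cols with
  | nil => simp [pick_best_datetime_py, pick_best_datetime_py_alt]
  | cons c0 rest =>
    unfold pick_best_datetime_py pick_best_datetime_py_alt
    simp only [reduceCtorEq, if_false, match_snd]
    rw [PySem.List.foldl_append_singleton_eq_map]
    unfold PySem.List.sorted2
    rw [head?_foldl_insertBy]
    simp only [List.map_cons, List.nil_append, if_true, List.foldl_cons, List.head?_nil]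
    rw [foldl_step_some, List.foldl_map]
    simp only [Option.map_some]
    congr 2
    apply List.foldl_ext
    intro b c hc
    rcases b with ⟨bn, bs⟩
    simp only [pvCount, Bool.or_eq_true, Bool.and_eq_true, Bool.not_eq_true',
      decide_eq_true_eq, decide_eq_false_iff_not]
    apply if_congr _ rfl rfl
    constructor
    · rintro (h | ⟨h1, h2⟩)
      · exact Or.inl h
      · by_cases hl : bn < PySem.Dict.getD (PySem.Dict.mk (PySem.Dict.getD (PySem.Dict.mk col_profile) c [])) "count" 0
        · exact Or.inl hl
        · exact Or.inr ⟨le_antisymm (not_lt.mp h1) (not_lt.mp hl), h2⟩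
    · rintro (h | ⟨h1, h2⟩)
      · exact Or.inl h
      · exact Or.inr ⟨not_lt.mpr h1.le, h2⟩
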